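-- pv_equiv track=rewrite | github.com/definitelynotrussellkirk-bit/binarySKILL | generators/functions.py | count_injections
-- ===== SOURCE A (Python) =====
-- def count_injections(m: int, n: int) -> int:
--     """
--     Count injective functions from [m] to [n].
--
--     This is the falling factorial: P(n, m) = n × (n-1) × ... × (n-m+1).
--
--     Args:
--         m: Domain size
--         n: Codomain size
--
--     Returns:
--         P(n, m) = n! / (n-m)!
--
--     Examples:
--         >>> count_injections(3, 5)
--         60
--         >>> count_injections(4, 7)
--         840
--         >>> count_injections(5, 5)
--         120
--     """
--     if m > n or m < 0 or n < 0:
--         return 0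
--     if m == 0:
--         return 1
--
--     # Compute falling factorial: n × (n-1) × ... × (n-m+1)
--     result = 1
--     for i in range(n, n - m, -1):
--         result *= i
--     return result
-- ===== SOURCE B (Python) =====
-- def count_injections(m: int, n: int) -> int:
--     if m > n or m < 0 or n < 0:
--         return 0
--
--     def prod_range(lo: int, hi: int) -> int:
--         """Product of the integers lo..hi inclusive, by balanced splitting."""
--         if lo > hi:
--             return 1
--         if lo == hi:
--             return lo
--         mid = (lo + hi) // 2
--         return prod_range(lo, mid) * prod_range(mid + 1, hi)
--
--     # P(n, m) = (n-m+1) * ... * n; empty product (m == 0) is 1.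
--     return prod_range(n - m + 1, n)
-- ===== Notes on version B (the rewrite author's own statement) =====
-- stated objective: alternative
-- what changed: Replaces A's linear countdown loop (and its separate m==0 branch) with a divide-and-conquer balanced product of the range [n-m+1, n]: the range is split at its midpoint and the two half-products are multiplied recursively, so the big-integer operands stay balanced in size.
import Mathlib
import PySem

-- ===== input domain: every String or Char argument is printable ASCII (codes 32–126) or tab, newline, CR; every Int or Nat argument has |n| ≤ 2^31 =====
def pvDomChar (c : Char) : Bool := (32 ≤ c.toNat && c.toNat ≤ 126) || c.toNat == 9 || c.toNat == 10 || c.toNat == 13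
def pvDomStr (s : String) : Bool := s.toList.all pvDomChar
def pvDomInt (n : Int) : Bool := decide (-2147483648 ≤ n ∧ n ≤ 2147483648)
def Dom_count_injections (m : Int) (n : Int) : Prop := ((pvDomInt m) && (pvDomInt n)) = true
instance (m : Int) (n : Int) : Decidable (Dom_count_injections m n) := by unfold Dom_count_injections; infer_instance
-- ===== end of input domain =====

-- B replaces A's linear countdown loop with a divide-and-conquer balanced product of the range [n-m+1, n] (alternative algorithm).


-- ===== PORT A =====
def count_injections (m : Int) (n : Int) : Int :=
  if m > n ∨ m < 0 ∨ n < 0 then 0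
  else if m = 0 then 1
  else (PySem.List.pyRange n (n - m) (-1)).foldl (fun result i => result * i) 1

-- ===== PORT B =====
-- prod_range(lo, hi): product of lo..hi inclusive by balanced splitting at mid = (lo+hi)//2.
def prodRange (lo hi : Int) : Int :=
  if _h1 : lo > hi then 1
  else if _h2 : lo = hi then lo
  else
    let mid := PySem.Int.floordiv (lo + hi) 2
    prodRange lo mid * prodRange (mid + 1) hi
termination_by (hi + 1 - lo).toNat
decreasing_by
  · have hb := PySem.Int.floordiv_two_mid_bounds (by omega : lo ≤ hi)
    have hlt : PySem.Int.floordiv (lo + hi) 2 < hi :=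
      (PySem.Int.floordiv_lt_iff_lt_mul (by omega)).mpr (by omega)
    omega
  · have hb := PySem.Int.floordiv_two_mid_bounds (by omega : lo ≤ hi)
    omega

def count_injections_alt (m : Int) (n : Int) : Int :=
  if m > n ∨ m < 0 ∨ n < 0 then 0
  else prodRange (n - m + 1) n

-- ===== PRECONDITION & SPEC =====
def Spec_count_injections (m : Int) (n : Int) (out : Int) : Prop := out = count_injections_alt m n
instance (m : Int) (n : Int) (out : Int) : Decidable (Spec_count_injections m n out) := by unfold Spec_count_injections; infer_instance

-- ===== CLAIM (what is proved, stated in full; the proofs are below) =====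
def Claim_equal_count_injections : Prop := ∀ (m : Int) (n : Int), Dom_count_injections m n → Spec_count_injections m n (count_injections m n)

-- ===== LEMMAS AND PROOFS =====

-- Ascending product of k integers starting at lo (proof-side reference function).
def pvAsc (lo : Int) : Nat → Int
  | 0 => 1
  | k + 1 => lo * pvAsc (lo + 1) k

theorem pvAsc_add (a : Nat) : ∀ (lo : Int) (b : Nat),
    pvAsc lo (a + b) = pvAsc lo a * pvAsc (lo + a) b := by
  induction a with
  | zero => intro lo b; simp [pvAsc]
  | succ a ih =>
      intro lo b
      have : a + 1 + b = (a + b) + 1 := by omega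
      rw [this]
      simp only [pvAsc, ih (lo + 1) b]
      push_cast
      ring_nf

-- The balanced split computes the ascending product of its range.
theorem pvProdRange_eq (k : Nat) : ∀ (lo hi : Int), (hi + 1 - lo).toNat = k →
    prodRange lo hi = pvAsc lo k := by
  induction k using Nat.strong_induction_on with
  | _ k ih =>
    intro lo hi hk
    rw [prodRange]
    by_cases h1 : lo > hi
    · rw [dif_pos h1]
      have : k = 0 := by omega
      subst this; simp [pvAsc]
    · rw [dif_neg h1]
      by_cases h2 : lo = hi
      · rw [dif_pos h2]
        have : k = 1 := by omega
        subst this; simp [pvAsc]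
      · rw [dif_neg h2]
        have hlohi : lo < hi := by omega
        have hb := PySem.Int.floordiv_two_mid_bounds (by omega : lo ≤ hi)
        have hlt : PySem.Int.floordiv (lo + hi) 2 < hi :=
          (PySem.Int.floordiv_lt_iff_lt_mul (by omega)).mpr (by omega)
        set mid := PySem.Int.floordiv (lo + hi) 2 with hmid
        have hL : prodRange lo mid = pvAsc lo (mid + 1 - lo).toNat :=
          ih _ (by omega) lo mid rfl
        have hR : prodRange (mid + 1) hi = pvAsc (mid + 1) (hi + 1 - (mid + 1)).toNat :=
          ih _ (by omega) (mid + 1) hi rfl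
        simp only [hL, hR]
        have hsplit : k = (mid + 1 - lo).toNat + (hi + 1 - (mid + 1)).toNat := by omega
        rw [hsplit, pvAsc_add]
        have : lo + ((mid + 1 - lo).toNat : Int) = mid + 1 := by omega
        rw [this]

-- pvAsc starting just above b equals the descending factorial (b ≥ 0).
theorem pvAsc_descFactorial (k : Nat) : ∀ (b : Int), 0 ≤ b →
    pvAsc (b + 1) k = (Nat.descFactorial (b.toNat + k) k : Int) := by
  induction k with
  | zero => intro b hb; simp [pvAsc]
  | succ k ih =>
      intro b hb
      have h1 : b + 1 + 1 = (b + 1) + 1 := by ring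
      simp only [pvAsc]
      rw [show b + 1 + 1 = (b + 1) + 1 from rfl, ih (b + 1) (by omega)]
      have h2 : (b + 1).toNat = b.toNat + 1 := by omega
      rw [h2, show b.toNat + (k + 1) = (b.toNat + 1 + k) from by omega,
        Nat.descFactorial_succ,
        show b.toNat + 1 + k - k = b.toNat + 1 from by omega]
      push_cast [Int.toNat_of_nonneg hb]
      ring

-- A's countdown product loop computes the falling factorial (b ≥ 0).
theorem pv_fall (k : Nat) : ∀ (b : Int), 0 ≤ b → ∀ (c : Int),
    (PySem.List.pyRange (b + k) b (-1)).foldl (fun result i => result * i) c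
      = c * (Nat.descFactorial (b.toNat + k) k : Int) := by
  induction k with
  | zero =>
      intro b hb c
      rw [PySem.List.pyRange_neg_one_eq_nil (by omega)]
      simp [List.foldl]
  | succ k ih =>
      intro b hb c
      rw [PySem.List.pyRange_neg_one_cons (by omega : b < b + (k + 1 : Nat))]
      have h1 : (b + ((k : Nat) + 1 : Nat) : Int) - 1 = b + (k : Nat) := by push_cast; ring
      have h2 : (b + ((k : Nat) + 1 : Nat) : Int) = (b.toNat + k + 1 : Nat) := by
        have := Int.toNat_of_nonneg hb; push_cast; omega
      simp only [List.foldl_cons, h1]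
      rw [ih b hb (c * (b + ((k + 1 : Nat) : Int))), h2,
        show b.toNat + (k + 1) = (b.toNat + k) + 1 from rfl,
        Nat.succ_descFactorial_succ]
      push_cast
      ring

-- ===== VERDICT (by name: the statement is the Claim_ definition above) =====
theorem count_injections_spec : Claim_equal_count_injections := by
  intro m n _
  unfold Spec_count_injections count_injections count_injections_alt
  by_cases hg : m > n ∨ m < 0 ∨ n < 0
  · rw [if_pos hg, if_pos hg]
  · rw [if_neg hg, if_neg hg]
    have hm : 0 ≤ m := by omega
    have hmn : m ≤ n := by omega
    have hB : prodRange (n - m + 1) n = pvAsc (n - m + 1) m.toNat :=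
      pvProdRange_eq m.toNat (n - m + 1) n (by omega)
    have hB2 : pvAsc ((n - m) + 1) m.toNat
        = (Nat.descFactorial ((n - m).toNat + m.toNat) m.toNat : Int) :=
      pvAsc_descFactorial m.toNat (n - m) (by omega)
    have htot : (n - m).toNat + m.toNat = n.toNat := by omega
    by_cases hm0 : m = 0
    · rw [if_pos hm0]; subst hm0
      rw [hB]; simp [pvAsc]
    · rw [if_neg hm0]
      have hkey := pv_fall m.toNat (n - m) (by omega) 1
      rw [show (n - m) + (m.toNat : Int) = n from by omega] at hkey
      rw [htot, one_mul] at hkey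
      rw [hkey, hB, show n - m + 1 = (n - m) + 1 from rfl, hB2, htot]
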